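-- pv_equiv track=rewrite | github.com/DougMouraA/Lista-de-Fundamentos | moduloSomaMultiplos.py | retornaDiferenca
-- ===== SOURCE A (Python) =====
-- def retornaDiferenca(n1, n2):
--     soma7 = 0
--     soma13 = 0
--     diferenca = 0
--     if n1 > n2:
--         return False
--     for i in range(n1+1, n2):
--         if i % 7 == 0:
--             soma7 += i
--         elif i % 13 == 0:
--             soma13 += i
--     diferenca = soma7 - soma13
--     return diferenca
-- ===== SOURCE B (Python) =====
-- def retornaDiferenca(n1, n2):
--     # Closed-form: sum multiples of m in (n1, n2) via triangular numbers; O(1).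
--     if n2 <= n1:
--         return 0
--     hi = n2 - 1
--
--     def s(m):
--         def T(k):
--             return k * (k + 1) // 2
--         return m * (T(hi // m) - T(n1 // m))
--
--     # A's elif means multiples of 91 count only towards the 7-sum.
--     return s(7) - s(13) + s(91)
-- ===== Notes on version B (the rewrite author's own statement) =====
-- stated objective: faster
-- what changed: Replaces the O(n2-n1) loop with closed-form arithmetic-series sums of multiples of 7, 13 and 91 (the 91-term compensates A's elif), computed via triangular numbers in O(1).
-- outside the precondition, e.g. on retornaDiferenca(10, 3): A returns False, B returns 0
import Mathlib
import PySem

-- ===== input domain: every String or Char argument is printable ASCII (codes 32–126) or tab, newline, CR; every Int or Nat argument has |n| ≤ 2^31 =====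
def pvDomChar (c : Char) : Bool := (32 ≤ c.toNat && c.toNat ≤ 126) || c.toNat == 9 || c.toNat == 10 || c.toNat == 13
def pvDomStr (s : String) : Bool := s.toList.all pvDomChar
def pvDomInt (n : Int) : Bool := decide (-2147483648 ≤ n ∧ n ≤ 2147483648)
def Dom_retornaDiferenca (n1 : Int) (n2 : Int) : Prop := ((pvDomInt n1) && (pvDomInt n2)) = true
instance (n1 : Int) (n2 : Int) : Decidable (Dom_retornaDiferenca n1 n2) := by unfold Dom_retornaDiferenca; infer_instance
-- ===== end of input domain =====

-- B replaces A's O(n2-n1) loop by closed-form triangular-number sums of multiples of 7, 13 and 91 (O(1)).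
-- Pre_ excludes n1 > n2, where A returns the bool False instead of an int.


-- ===== PORT A =====
def retornaDiferenca (n1 : Int) (n2 : Int) : Int :=
  if n1 > n2 then 0  -- Python returns False (a bool, not an int) here; excluded by Pre_
  else
    let st := (PySem.List.pyRange (n1+1) n2 1).foldl
      (fun (s : Int × Int) i =>
        if PySem.Int.mod i 7 = 0 then (s.1 + i, s.2)
        else if PySem.Int.mod i 13 = 0 then (s.1, s.2 + i)
        else s) (0, 0)
    st.1 - st.2

-- ===== PORT B =====
def pvT (k : Int) : Int := PySem.Int.floordiv (k * (k + 1)) 2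

def pvS (m : Int) (n1 : Int) (hi : Int) : Int :=
  m * (pvT (PySem.Int.floordiv hi m) - pvT (PySem.Int.floordiv n1 m))

def retornaDiferenca_alt (n1 : Int) (n2 : Int) : Int :=
  if n2 ≤ n1 then 0
  else pvS 7 n1 (n2-1) - pvS 13 n1 (n2-1) + pvS 91 n1 (n2-1)

-- ===== PRECONDITION & SPEC =====
-- Pre_ excludes n1 > n2: there A returns the bool False, not a value of the declared int type.
def Pre_retornaDiferenca (n1 : Int) (n2 : Int) : Prop := n1 ≤ n2
instance (n1 : Int) (n2 : Int) : Decidable (Pre_retornaDiferenca n1 n2) := by unfold Pre_retornaDiferenca; infer_instance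
def pvWitness_retornaDiferenca : Int × Int := (0, 100)

def Spec_retornaDiferenca (n1 : Int) (n2 : Int) (out : Int) : Prop := out = retornaDiferenca_alt n1 n2
instance (n1 : Int) (n2 : Int) (out : Int) : Decidable (Spec_retornaDiferenca n1 n2 out) := by unfold Spec_retornaDiferenca; infer_instance

-- ===== CLAIM (what is proved, stated in full; the proofs are below) =====
def Claim_equal_retornaDiferenca : Prop := ∀ (n1 : Int) (n2 : Int), Dom_retornaDiferenca n1 n2 → Pre_retornaDiferenca n1 n2 → Spec_retornaDiferenca n1 n2 (retornaDiferenca n1 n2)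

-- ===== LEMMAS AND PROOFS =====

-- net contribution of one i to A's result soma7 - soma13
def pvG (i : Int) : Int := if (7:Int) ∣ i then i else if (13:Int) ∣ i then -i else 0
-- indicator-weighted term for one modulus
def pvH (m i : Int) : Int := if m ∣ i then i else 0

lemma pv91 {i : Int} (h7 : (7:Int) ∣ i) (h13 : (13:Int) ∣ i) : (91:Int) ∣ i := by
  have hc : IsCoprime (7:Int) 13 := by
    rw [Int.isCoprime_iff_gcd_eq_one]; decide
  exact hc.mul_dvd h7 h13

lemma pvG_eq (i : Int) : pvG i = pvH 7 i - pvH 13 i + pvH 91 i := by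
  unfold pvG pvH
  by_cases h7 : (7:Int) ∣ i <;> by_cases h13 : (13:Int) ∣ i
  · simp [h7, h13, pv91 h7 h13]
  · have h91 : ¬ (91:Int) ∣ i := fun h => h13 (dvd_trans (by norm_num) h)
    simp [h7, h13, h91]
  · have h91 : ¬ (91:Int) ∣ i := fun h => h7 (dvd_trans (by norm_num) h)
    simp [h7, h13, h91]
  · have h91 : ¬ (91:Int) ∣ i := fun h => h7 (dvd_trans (by norm_num) h)
    simp [h7, h13, h91]

lemma pvFold (l : List Int) (a b : Int) :
    (l.foldl (fun (s : Int × Int) i =>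
        if PySem.Int.mod i 7 = 0 then (s.1 + i, s.2)
        else if PySem.Int.mod i 13 = 0 then (s.1, s.2 + i)
        else s) (a, b)).1
    - (l.foldl (fun (s : Int × Int) i =>
        if PySem.Int.mod i 7 = 0 then (s.1 + i, s.2)
        else if PySem.Int.mod i 13 = 0 then (s.1, s.2 + i)
        else s) (a, b)).2
    = a - b + (l.map pvG).sum := by
  induction l generalizing a b with
  | nil => simp
  | cons x xs ih =>
    simp only [List.foldl_cons, List.map_cons, List.sum_cons]
    by_cases h7 : PySem.Int.mod x 7 = 0
    · have d7 : (7:Int) ∣ x := (PySem.Int.mod_eq_zero_iff_dvd x 7).mp h7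
      rw [if_pos h7, ih]
      simp only [pvG, if_pos d7]; ring
    · have d7 : ¬ (7:Int) ∣ x := fun h => h7 ((PySem.Int.mod_eq_zero_iff_dvd x 7).mpr h)
      by_cases h13 : PySem.Int.mod x 13 = 0
      · have d13 : (13:Int) ∣ x := (PySem.Int.mod_eq_zero_iff_dvd x 13).mp h13
        rw [if_neg h7, if_pos h13, ih]
        simp only [pvG, if_neg d7, if_pos d13]; ring
      · have d13 : ¬ (13:Int) ∣ x := fun h => h13 ((PySem.Int.mod_eq_zero_iff_dvd x 13).mpr h)
        rw [if_neg h7, if_neg h13, ih]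
        simp only [pvG, if_neg d7, if_neg d13]; ring

lemma pvT_two (k : Int) : 2 * pvT k = k * (k + 1) := by
  unfold pvT
  rw [PySem.Int.floordiv_eq_ediv_of_pos (by norm_num)]
  exact Int.mul_ediv_cancel' (Int.even_mul_succ_self k).two_dvd

lemma pvT_succ (k : Int) : pvT k - pvT (k - 1) = k := by
  have e : 2 * (pvT k - pvT (k - 1)) = 2 * k := by
    linear_combination pvT_two k - pvT_two (k - 1)
  omega

lemma pvStep (m b : Int) (hm : 0 < m) :
    m * pvT (PySem.Int.floordiv b m) - m * pvT (PySem.Int.floordiv (b-1) m) = pvH m b := by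
  rw [PySem.Int.floordiv_eq_ediv_of_pos hm, PySem.Int.floordiv_eq_ediv_of_pos hm]
  have hm0 : m ≠ 0 := by omega
  have hb : m * (b / m) + b % m = b := Int.mul_ediv_add_emod b m
  by_cases hd : m ∣ b
  · have hr : b % m = 0 := Int.emod_eq_zero_of_dvd hd
    rw [hr] at hb
    have e : b - 1 = (m - 1) + (b / m - 1) * m := by linear_combination -hb
    rw [e, Int.add_mul_ediv_right _ _ hm0,
        show (m - 1) / m = 0 from Int.ediv_eq_zero_of_lt (by omega) (by omega), zero_add]
    unfold pvH
    rw [if_pos hd]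
    linear_combination m * pvT_succ (b / m) + hb
  · have hr0 : 0 ≤ b % m := Int.emod_nonneg b hm0
    have hrm : b % m < m := Int.emod_lt_of_pos b hm
    have hr : b % m ≠ 0 := fun h => hd (Int.dvd_of_emod_eq_zero h)
    have e : b - 1 = (b % m - 1) + (b / m) * m := by linear_combination -hb
    rw [e, Int.add_mul_ediv_right _ _ hm0,
        show (b % m - 1) / m = 0 from Int.ediv_eq_zero_of_lt (by omega) (by omega), zero_add]
    unfold pvH
    rw [if_neg hd]
    ring

lemma pvRangeSum (m : Int) (hm : 0 < m) (a b : Int) (h : a ≤ b) :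
    ((PySem.List.pyRange (a+1) (b+1) 1).map (pvH m)).sum = pvS m a b := by
  induction b, h using Int.le_induction with
  | base =>
    rw [PySem.List.pyRange_one_eq_nil (by omega)]
    unfold pvS
    simp
  | succ b hb ih =>
    rw [PySem.List.pyRange_one_succ_right (by omega), List.map_append,
        List.sum_append, ih]
    have hs := pvStep m (b+1) hm
    simp only [add_sub_cancel_right] at hs
    unfold pvS at *
    simp only [List.map_cons, List.map_nil, List.sum_cons, List.sum_nil]
    linarith [hs]

lemma pvSumSplit (l : List Int) :
    (l.map pvG).sum = (l.map (pvH 7)).sum - (l.map (pvH 13)).sum + (l.map (pvH 91)).sum := by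
  induction l with
  | nil => simp
  | cons x xs ih => simp [pvG_eq, ih]; ring

-- ===== VERDICT (by name: the statement is the Claim_ definition above) =====
theorem retornaDiferenca_spec : Claim_equal_retornaDiferenca := by
  intro n1 n2 _ hpre
  unfold Pre_retornaDiferenca at hpre
  unfold Spec_retornaDiferenca
  by_cases h : n2 ≤ n1
  · simp only [retornaDiferenca, retornaDiferenca_alt, if_neg (show ¬ n1 > n2 by omega),
      if_pos h, PySem.List.pyRange_one_eq_nil (show n2 ≤ n1 + 1 by omega)]
    simp
  · simp only [retornaDiferenca, retornaDiferenca_alt, if_neg (show ¬ n1 > n2 by omega),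
      if_neg h]
    rw [show n2 = (n2 - 1) + 1 by ring]
    rw [pvFold, pvSumSplit,
        pvRangeSum 7 (by norm_num) n1 (n2-1) (by omega),
        pvRangeSum 13 (by norm_num) n1 (n2-1) (by omega),
        pvRangeSum 91 (by norm_num) n1 (n2-1) (by omega)]
    ring
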